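-- pv_equiv track=rewrite | github.com/jins408/Algorithm | programmers/Level1/공원 산책.py | solution
-- ===== SOURCE A (Python) =====
-- def solution(park, routes):
--     # 위치
--     r = 0
--     c = 0
--
--     # 'S'가 있는 곳이 좌표의 시작위치
--     for i in range(len(park)):
--         for j in range(len(park[i])):
--             if park[i][j] == 'S':
--                 r = i
--                 c = j
--                 break
--     # 이동
--     for route in routes:
--         # if,elif에 걸리지 않으면 좌표 초기화
--         nr = r
--         nc = c
--         for k in range(int(route[2])): # route="E 2"일때,route[0]='E' route[2]=2
--             # route[2]만큼 for문을 돌면서 좌표를 찾아준다.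
--             # 동 (동쪽으로 이동했을때, 동쪽 맨끝쪽이면 안되고, 장애물을 만나서도 안됨)
--             if route[0] == 'E' and nc < len(park[0])-1 and park[nr][nc+1] != 'X':
--                 nc += 1
--                 if k == int(route[2])-1:
--                     # k가 route[2]와 같아지면 해당하는 if문 종료
--                     c = nc
--             # 서 (서쪽으로 이동했을때, 서쪽 맨끝쪽이면 안되고, 장애물을 만나서도 안됨)
--             elif route[0] == 'W' and nc > 0 and park[nr][nc-1] != 'X':
--                 nc-=1
--                 if k == int(route[2])-1:
--                     c = nc
--             # 남 (남쪽으로 이동했을때, 남쪽 맨끝쪽이면 안되고, 장애물을 만나서도 안됨)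
--             elif route[0] == 'S' and nr < len(park)-1 and park[nr+1][nc] != 'X':
--                 nr += 1
--                 if k == int(route[2])-1:
--                     r = nr
--             # 북 (북쪽으로 이동했을때, 북쪽 맨끝쪽이면 안되고, 장애물을 만나서도 안됨)
--             elif route[0] == 'N' and nr > 0 and park[nr-1][nc] != 'X':
--                 nr -= 1
--                 if k == int(route[2])-1:
--                     r = nr
--
--     return [r, c]
-- ===== SOURCE B (Python) =====
-- def solution(park, routes):
--     found = [(i, row.index('S')) for i, row in enumerate(park) if 'S' in row]
--     r, c = found[-1] if found else (0, 0)
--     rows = len(park)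
--     cols = len(park[0]) if park else 0
--     for route in routes:
--         d, n = route[0], int(route[2])
--         if d == 'E' and c + n < cols and all(park[r][j] != 'X' for j in range(c + 1, c + n + 1)):
--             c += n
--         elif d == 'W' and c - n >= 0 and all(park[r][j] != 'X' for j in range(c - n, c)):
--             c -= n
--         elif d == 'S' and r + n < rows and all(park[i][c] != 'X' for i in range(r + 1, r + n + 1)):
--             r += n
--         elif d == 'N' and r - n >= 0 and all(park[i][c] != 'X' for i in range(r - n, r)):
--             r -= n
--     return [r, c]
-- ===== Notes on version B (the rewrite author's own statement) =====
-- stated objective: simpler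
-- what changed: Replaced A's per-step tentative simulation (stepping nr,nc one cell at a time with a commit-only-on-the-last-k trick) by a closed-form move: compute the destination arithmetically, check the bound once and check every cell on the path by index range, then jump; the start is taken as the last element of a comprehension of 'S' positions instead of a double scan with break.
-- outside the precondition, e.g. on solution(['O', 'OS', 'OO'], ['S 1']): A returns [2, 1], B returns [2, 1]; on solution(['OS', 'O'], ['S 1']): A raises IndexError, B raises IndexError
import Mathlib
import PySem

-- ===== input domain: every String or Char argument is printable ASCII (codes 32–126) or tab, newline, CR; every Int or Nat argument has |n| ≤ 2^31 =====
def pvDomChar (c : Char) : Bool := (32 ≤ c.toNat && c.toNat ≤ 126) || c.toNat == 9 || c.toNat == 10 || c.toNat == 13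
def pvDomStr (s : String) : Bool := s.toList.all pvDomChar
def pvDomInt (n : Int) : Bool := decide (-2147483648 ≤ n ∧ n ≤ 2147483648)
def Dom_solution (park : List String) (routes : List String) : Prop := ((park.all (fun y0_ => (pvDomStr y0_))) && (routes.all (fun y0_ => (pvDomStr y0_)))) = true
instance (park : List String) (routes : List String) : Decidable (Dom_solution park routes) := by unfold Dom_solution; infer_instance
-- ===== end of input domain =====

-- B replaces A's per-step tentative walk (with its commit-only-on-the-last-k trick) by a
-- closed-form move: destination computed arithmetically, bound checked once, every path cell
-- checked over an index range; objective: simpler.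

-- ===== PORT A =====

-- park[i][j] (Python indexing; the default is only reachable outside Pre_solution)
def pvCell (P : List (List Char)) (i j : Int) : Char :=
  (PySem.List.pyGet? ((PySem.List.pyGet? P i).getD []) j).getD '?'

-- the inner 'for j in range(len(park[i])): if park[i][j]=='S': … break' loop
def pvScanRow : List Char → Nat → Option Nat
  | [], _ => none
  | ch :: rest, j => if ch = 'S' then some j else pvScanRow rest (j + 1)

-- the double scan for 'S' (no break on the outer loop: a later row overrides)
def pvStartA (P : List (List Char)) : Int × Int :=
  (PySem.List.enumerate P 0).foldl
    (fun rc ir =>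
      match pvScanRow ir.2 0 with
      | some j => (ir.1, (j : Int))
      | none => rc)
    ((0 : Int), (0 : Int))

-- one iteration of A's inner 'for k in range(int(route[2]))' loop; state ((nr, nc), (r, c))
def pvStepA (P : List (List Char)) (dist : Int) (d : Char)
    (s : (Int × Int) × Int × Int) (k : Int) : (Int × Int) × Int × Int :=
  let nr := s.1.1
  let nc := s.1.2
  let r := s.2.1
  let c := s.2.2
  if d = 'E' ∧ nc < (((PySem.List.pyGet? P 0).getD []).length : Int) - 1 ∧ pvCell P nr (nc + 1) ≠ 'X' then
    ((nr, nc + 1), (r, if k = dist - 1 then nc + 1 else c))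
  else if d = 'W' ∧ 0 < nc ∧ pvCell P nr (nc - 1) ≠ 'X' then
    ((nr, nc - 1), (r, if k = dist - 1 then nc - 1 else c))
  else if d = 'S' ∧ nr < (P.length : Int) - 1 ∧ pvCell P (nr + 1) nc ≠ 'X' then
    ((nr + 1, nc), ((if k = dist - 1 then nr + 1 else r), c))
  else if d = 'N' ∧ 0 < nr ∧ pvCell P (nr - 1) nc ≠ 'X' then
    ((nr - 1, nc), ((if k = dist - 1 then nr - 1 else r), c))
  else s

-- one route of A's outer loop
def pvRouteA (P : List (List Char)) (route : List Char) (rc : Int × Int) : Int × Int :=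
  ((PySem.List.pyRange 0 ((PySem.Int.ofChars? [(PySem.List.pyGet? route 2).getD ' ']).getD 0) 1).foldl
      (pvStepA P ((PySem.Int.ofChars? [(PySem.List.pyGet? route 2).getD ' ']).getD 0)
        ((PySem.List.pyGet? route 0).getD ' '))
      (rc, rc)).2

def solution (park : List String) (routes : List String) : List Int :=
  let P := park.map String.toList
  let f := routes.foldl (fun rc route => pvRouteA P route.toList rc) (pvStartA P)
  [f.1, f.2]

-- ===== PORT B =====

-- park[i][j] on B's side (same Python indexing primitive)
def pvCellB (P : List (List Char)) (i j : Int) : Char :=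
  (PySem.List.pyGet? ((PySem.List.pyGet? P i).getD []) j).getD '?'

-- '[(i, row.index('S')) for i, row in enumerate(park) if 'S' in row]'
def pvFoundB (P : List (List Char)) : List (Int × Int) :=
  ((PySem.List.enumerate P 0).filter (fun ir => decide ('S' ∈ ir.2))).map
    (fun ir => (ir.1, (((PySem.List.index? ir.2 'S').getD 0 : Nat) : Int)))

-- one route of B's loop: bound check plus obstacle-free path check, then a direct jump
def pvRouteB (P : List (List Char)) (rows cols : Int) (route : List Char) (rc : Int × Int) : Int × Int :=
  let d := (PySem.List.pyGet? route 0).getD ' '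
  let n := (PySem.Int.ofChars? [(PySem.List.pyGet? route 2).getD ' ']).getD 0
  if d = 'E' ∧ rc.2 + n < cols ∧ ∀ j ∈ PySem.List.pyRange (rc.2 + 1) (rc.2 + n + 1) 1, pvCellB P rc.1 j ≠ 'X' then
    (rc.1, rc.2 + n)
  else if d = 'W' ∧ 0 ≤ rc.2 - n ∧ ∀ j ∈ PySem.List.pyRange (rc.2 - n) rc.2 1, pvCellB P rc.1 j ≠ 'X' then
    (rc.1, rc.2 - n)
  else if d = 'S' ∧ rc.1 + n < rows ∧ ∀ i ∈ PySem.List.pyRange (rc.1 + 1) (rc.1 + n + 1) 1, pvCellB P i rc.2 ≠ 'X' then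
    (rc.1 + n, rc.2)
  else if d = 'N' ∧ 0 ≤ rc.1 - n ∧ ∀ i ∈ PySem.List.pyRange (rc.1 - n) rc.1 1, pvCellB P i rc.2 ≠ 'X' then
    (rc.1 - n, rc.2)
  else rc

def solution_alt (park : List String) (routes : List String) : List Int :=
  let P := park.map String.toList
  let rc0 := (pvFoundB P).getLastD (0, 0)
  let rows : Int := P.length
  let cols : Int := if P = [] then 0 else ((P.headD []).length : Int)
  let f := routes.foldl (fun rc route => pvRouteB P rows cols route.toList rc) rc0
  [f.1, f.2]

-- ===== PRECONDITION & SPEC =====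
-- Pre_ excludes exactly the inputs on which the Python A raises: a route shorter than 3 characters
-- or with a non-digit route[2] (ValueError/IndexError), and — only when some route could actually
-- move (direction in EWSN with a nonzero digit) — empty or ragged parks, on which A's per-step
-- reads can run past a row end (IndexError); it excludes a few ragged-park inputs where A happens
-- to be blocked before any bad read and returns — B returns the same value there (see cites).
def Pre_solution (park : List String) (routes : List String) : Prop :=
  (∀ route ∈ routes, 3 ≤ route.toList.length ∧ (route.toList.getD 2 ' ').isDigit) ∧
  ((∃ route ∈ routes, route.toList.getD 0 ' ' ∈ (['E', 'W', 'S', 'N'] : List Char) ∧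
      route.toList.getD 2 ' ' ≠ '0') →
    park ≠ [] ∧ 0 < (park.headD "").toList.length ∧
    (∀ row ∈ park, row.toList.length = (park.headD "").toList.length))
instance (park : List String) (routes : List String) : Decidable (Pre_solution park routes) := by
  unfold Pre_solution; infer_instance

def pvWitness_solution : List String × List String := (["SO", "OX"], ["E 1", "S 2"])

def Spec_solution (park : List String) (routes : List String) (out : List Int) : Prop := out = solution_alt park routes
instance (park : List String) (routes : List String) (out : List Int) : Decidable (Spec_solution park routes out) := by unfold Spec_solution; infer_instance

-- ===== CLAIM (what is proved, stated in full; the proofs are below) =====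
def Claim_equal_solution : Prop := ∀ (park : List String) (routes : List String), Dom_solution park routes → Pre_solution park routes → Spec_solution park routes (solution park routes)

-- ===== LEMMAS AND PROOFS =====

theorem pvCellB_eq : pvCellB = pvCell := rfl

-- generic shape of A's inner loop for a fixed direction: cond = "can step", mv = step, cm = commit
def pvGStep (dist : Int) (cond : Int × Int → Prop) [DecidablePred cond]
    (mv : Int × Int → Int × Int) (cm : Int × Int → Int × Int → Int × Int)
    (s : (Int × Int) × Int × Int) (k : Int) : (Int × Int) × Int × Int :=
  if cond s.1 then (mv s.1, if k = dist - 1 then cm (mv s.1) s.2 else s.2) else s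

-- the (nr, nc) evolution of A's inner loop: try to step n times, staying put once blocked
def pvTry (cond : Int × Int → Prop) [DecidablePred cond] (mv : Int × Int → Int × Int) :
    Nat → Int × Int → Int × Int
  | 0, p => p
  | n + 1, p => if cond p then pvTry cond mv n (mv p) else pvTry cond mv n p

theorem pvTry_stuck (cond : Int × Int → Prop) [DecidablePred cond] (mv : Int × Int → Int × Int)
    (n : Nat) (p : Int × Int) (h : ¬ cond p) : pvTry cond mv n p = p := by
  induction n with
  | zero => rfl
  | succ n ih => simp [pvTry, h, ih]

-- folding pvGStep over indices none of which is dist-1 never commits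
theorem pvFoldl_no_commit (dist : Int) (cond : Int × Int → Prop) [DecidablePred cond]
    (mv : Int × Int → Int × Int) (cm : Int × Int → Int × Int → Int × Int)
    (l : List Int) (h : ∀ k ∈ l, k ≠ dist - 1) (s : (Int × Int) × Int × Int) :
    l.foldl (pvGStep dist cond mv cm) s = (pvTry cond mv l.length s.1, s.2) := by
  induction l generalizing s with
  | nil => simp [pvTry]
  | cons k l ih =>
    have hk : k ≠ dist - 1 := h k (by simp)
    rw [List.foldl_cons, ih (fun x hx => h x (List.mem_cons_of_mem k hx))]
    by_cases hc : cond s.1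
    · simp [pvGStep, hc, hk, pvTry]
    · simp [pvGStep, hc, pvTry]

-- folding pvGStep over range(dist), dist ≥ 1: the only commit index is the last one, dist-1
theorem pvFoldl_range (dist : Int) (cond : Int × Int → Prop) [DecidablePred cond]
    (mv : Int × Int → Int × Int) (cm : Int × Int → Int × Int → Int × Int)
    (hd : 1 ≤ dist) (p rc : Int × Int) :
    (PySem.List.pyRange 0 dist 1).foldl (pvGStep dist cond mv cm) (p, rc)
      = (if cond (pvTry cond mv (dist - 1).toNat p) then
           (mv (pvTry cond mv (dist - 1).toNat p),
            cm (mv (pvTry cond mv (dist - 1).toNat p)) rc)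
         else (pvTry cond mv (dist - 1).toNat p, rc)) := by
  rw [PySem.List.pyRange_one_append 0 (dist - 1) dist (by omega) (by omega), List.foldl_append]
  rw [pvFoldl_no_commit dist cond mv cm (PySem.List.pyRange 0 (dist - 1) 1)
        (fun k hk => by have := (PySem.List.mem_pyRange_one).1 hk; omega) (p, rc)]
  have hsing : PySem.List.pyRange (dist - 1) dist 1 = [dist - 1] := by
    have h1 := PySem.List.pyRange_one_singleton (a := dist - 1)
    rw [show dist - 1 + 1 = dist by ring] at h1
    exact h1
  have hlen : (PySem.List.pyRange 0 (dist - 1) 1).length = (dist - 1).toNat := by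
    rw [PySem.List.length_pyRange_one]; congr 1; omega
  rw [hsing, hlen, List.foldl_cons, List.foldl_nil]
  simp [pvGStep]

-- the (nr, nc) walk is a translation: either every step succeeded (endpoint = p + m·(dr,dc))
-- or the walk got stuck at a blocked state
theorem pvTry_trans (cond : Int × Int → Prop) [DecidablePred cond] (dr dc : Int) (m : Nat)
    (p : Int × Int) :
    ((∀ j : Nat, j < m → cond (p.1 + dr * j, p.2 + dc * j)) →
      pvTry cond (fun q => (q.1 + dr, q.2 + dc)) m p = (p.1 + dr * m, p.2 + dc * m))
    ∧ (¬ (∀ j : Nat, j < m → cond (p.1 + dr * j, p.2 + dc * j)) →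
      ¬ cond (pvTry cond (fun q => (q.1 + dr, q.2 + dc)) m p)) := by
  induction m generalizing p with
  | zero =>
    exact ⟨fun _ => by simp [pvTry], fun h => absurd (fun j hj => absurd hj (by omega)) h⟩
  | succ m ih =>
    by_cases hc : cond p
    · have hstep : pvTry cond (fun q => (q.1 + dr, q.2 + dc)) (m + 1) p
          = pvTry cond (fun q => (q.1 + dr, q.2 + dc)) m (p.1 + dr, p.2 + dc) := by
        simp [pvTry, hc]
      have hshift : (∀ j : Nat, j < m → cond ((p.1 + dr) + dr * j, (p.2 + dc) + dc * j))
          ↔ (∀ j : Nat, j < m + 1 → cond (p.1 + dr * j, p.2 + dc * j)) := by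
        constructor
        · intro h j hj
          cases j with
          | zero => simpa using hc
          | succ k =>
            have hk := h k (by omega)
            have e1 : (p.1 + dr) + dr * (k : Int) = p.1 + dr * ((k : Nat) + 1 : Nat) := by
              push_cast; ring
            have e2 : (p.2 + dc) + dc * (k : Int) = p.2 + dc * ((k : Nat) + 1 : Nat) := by
              push_cast; ring
            rwa [e1, e2] at hk
        · intro h j hj
          have hk := h (j + 1) (by omega)
          have e1 : p.1 + dr * ((j : Nat) + 1 : Nat) = (p.1 + dr) + dr * (j : Int) := by
            push_cast; ring
          have e2 : p.2 + dc * ((j : Nat) + 1 : Nat) = (p.2 + dc) + dc * (j : Int) := by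
            push_cast; ring
          rwa [e1, e2] at hk
      obtain ⟨ih1, ih2⟩ := ih (p.1 + dr, p.2 + dc)
      refine ⟨fun hall => ?_, fun hnall => ?_⟩
      · rw [hstep, ih1 (hshift.2 hall)]
        have e1 : (p.1 + dr) + dr * (m : Int) = p.1 + dr * ((m : Nat) + 1 : Nat) := by
          push_cast; ring
        have e2 : (p.2 + dc) + dc * (m : Int) = p.2 + dc * ((m : Nat) + 1 : Nat) := by
          push_cast; ring
        rw [e1, e2]
      · rw [hstep]
        exact ih2 (fun h => hnall (hshift.1 h))
    · refine ⟨fun hall => absurd (by simpa using hall 0 (by omega)) hc, fun _ => ?_⟩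
      have hstep : pvTry cond (fun q => (q.1 + dr, q.2 + dc)) (m + 1) p
          = pvTry cond (fun q => (q.1 + dr, q.2 + dc)) m p := by
        simp [pvTry, hc]
      rw [hstep, pvTry_stuck _ _ _ _ hc]
      exact hc

-- A's inner loop in closed form: it commits exactly when every one of the m steps succeeds
theorem pvFold_char (cond : Int × Int → Prop) [DecidablePred cond] (dr dc : Int)
    (cm : Int × Int → Int × Int → Int × Int) (m : Nat) (hm : 1 ≤ m) (rc : Int × Int) :
    ((PySem.List.pyRange 0 (m : Int) 1).foldl
        (pvGStep (m : Int) cond (fun q => (q.1 + dr, q.2 + dc)) cm) (rc, rc)).2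
      = if (∀ j : Nat, j < m → cond (rc.1 + dr * j, rc.2 + dc * j))
        then cm (rc.1 + dr * m, rc.2 + dc * m) rc else rc := by
  rw [pvFoldl_range (m : Int) cond _ cm (by exact_mod_cast hm) rc rc]
  have hnat : ((m : Int) - 1).toNat = m - 1 := by omega
  rw [hnat]
  obtain ⟨ht1, ht2⟩ := pvTry_trans cond dr dc (m - 1) rc
  by_cases hall : ∀ j : Nat, j < m → cond (rc.1 + dr * j, rc.2 + dc * j)
  · have hall' : ∀ j : Nat, j < m - 1 → cond (rc.1 + dr * j, rc.2 + dc * j) :=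
      fun j hj => hall j (by omega)
    rw [ht1 hall']
    have hcond : cond (rc.1 + dr * ((m - 1 : Nat) : Int), rc.2 + dc * ((m - 1 : Nat) : Int)) :=
      hall (m - 1) (by omega)
    rw [if_pos hcond, if_pos hall]
    have e1 : (rc.1 + dr * ((m - 1 : Nat) : Int)) + dr = rc.1 + dr * (m : Nat) := by
      have : ((m - 1 : Nat) : Int) = (m : Int) - 1 := by omega
      rw [this]; ring
    have e2 : (rc.2 + dc * ((m - 1 : Nat) : Int)) + dc = rc.2 + dc * (m : Nat) := by
      have : ((m - 1 : Nat) : Int) = (m : Int) - 1 := by omega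
      rw [this]; ring
    simp only [e1, e2]
  · by_cases hall' : ∀ j : Nat, j < m - 1 → cond (rc.1 + dr * j, rc.2 + dc * j)
    · rw [ht1 hall']
      have hnc : ¬ cond (rc.1 + dr * ((m - 1 : Nat) : Int), rc.2 + dc * ((m - 1 : Nat) : Int)) := by
        intro hcend
        apply hall
        intro j hj
        by_cases hj' : j < m - 1
        · exact hall' j hj'
        · have : j = m - 1 := by omega
          rw [this]; exact hcend
      rw [if_neg hnc, if_neg hall]
    · rw [if_neg (ht2 hall'), if_neg hall]

-- ascending path (E and S): per-step bound+cell checks ↔ one bound check and a range of cells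
theorem pvAsc_iff (Q : Int → Prop) (bnd base : Int) (m : Nat) (hm : 1 ≤ m) :
    (∀ j : Nat, j < m → (base + (j : Int) < bnd - 1 ∧ Q (base + (j : Int) + 1)))
      ↔ (base + (m : Int) < bnd ∧ ∀ i ∈ PySem.List.pyRange (base + 1) (base + (m : Int) + 1) 1, Q i) := by
  constructor
  · intro h
    refine ⟨?_, ?_⟩
    · have hb := (h (m - 1) (by omega)).1
      have : ((m - 1 : Nat) : Int) = (m : Int) - 1 := by omega
      rw [this] at hb; omega
    · intro i hi
      rw [PySem.List.mem_pyRange_one] at hi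
      obtain ⟨j, hj1, hj2⟩ : ∃ j : Nat, (j : Int) = i - base - 1 ∧ j < m := ⟨(i - base - 1).toNat, by omega, by omega⟩
      have hq := (h j hj2).2
      have : base + (j : Int) + 1 = i := by omega
      rwa [this] at hq
  · rintro ⟨h1, h2⟩ j hj
    refine ⟨by omega, h2 (base + (j : Int) + 1) ?_⟩
    rw [PySem.List.mem_pyRange_one]
    omega

-- descending path (W and N)
theorem pvDesc_iff (Q : Int → Prop) (base : Int) (m : Nat) (hm : 1 ≤ m) :
    (∀ j : Nat, j < m → (0 < base - (j : Int) ∧ Q (base - (j : Int) - 1)))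
      ↔ (0 ≤ base - (m : Int) ∧ ∀ i ∈ PySem.List.pyRange (base - (m : Int)) base 1, Q i) := by
  constructor
  · intro h
    refine ⟨?_, ?_⟩
    · have hb := (h (m - 1) (by omega)).1
      have : ((m - 1 : Nat) : Int) = (m : Int) - 1 := by omega
      rw [this] at hb; omega
    · intro i hi
      rw [PySem.List.mem_pyRange_one] at hi
      obtain ⟨j, hj1, hj2⟩ : ∃ j : Nat, (j : Int) = base - 1 - i ∧ j < m := ⟨(base - 1 - i).toNat, by omega, by omega⟩
      have hq := (h j hj2).2
      have : base - (j : Int) - 1 = i := by omega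
      rwa [this] at hq
  · rintro ⟨h1, h2⟩ j hj
    refine ⟨by omega, h2 (base - (j : Int) - 1) ?_⟩
    rw [PySem.List.mem_pyRange_one]
    omega

-- A's step function for each direction is an instance of pvGStep
theorem pvStepA_E (P : List (List Char)) (dist : Int) :
    pvStepA P dist 'E' = pvGStep dist
      (fun q => q.2 < (((PySem.List.pyGet? P 0).getD []).length : Int) - 1 ∧ pvCell P q.1 (q.2 + 1) ≠ 'X')
      (fun q => (q.1 + 0, q.2 + 1)) (fun q rc => (rc.1, q.2)) := by
  funext s k
  obtain ⟨⟨nr, nc⟩, r, c⟩ := s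
  simp only [pvStepA, pvGStep]
  by_cases h1 : nc < (((PySem.List.pyGet? P 0).getD []).length : Int) - 1 ∧ pvCell P nr (nc + 1) ≠ 'X'
  · by_cases hk : k = dist - 1 <;> simp [h1, hk]
  · simp [h1]

theorem pvStepA_W (P : List (List Char)) (dist : Int) :
    pvStepA P dist 'W' = pvGStep dist
      (fun q => 0 < q.2 ∧ pvCell P q.1 (q.2 - 1) ≠ 'X')
      (fun q => (q.1 + 0, q.2 + -1)) (fun q rc => (rc.1, q.2)) := by
  funext s k
  obtain ⟨⟨nr, nc⟩, r, c⟩ := s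
  simp only [pvStepA, pvGStep]
  by_cases h1 : 0 < nc ∧ pvCell P nr (nc - 1) ≠ 'X'
  · by_cases hk : k = dist - 1
    · simp [h1, hk, sub_eq_add_neg]
    · have hk2 : ¬ k = dist + -1 := fun h => hk (by omega)
      simp [h1, hk2, sub_eq_add_neg]
  · have h1' : ¬ (0 < nc ∧ ¬ pvCell P nr (nc + -1) = 'X') := by
      rw [show nc + -1 = nc - 1 by ring]; exact h1
    simp [h1', sub_eq_add_neg]

theorem pvStepA_S (P : List (List Char)) (dist : Int) :
    pvStepA P dist 'S' = pvGStep dist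
      (fun q => q.1 < (P.length : Int) - 1 ∧ pvCell P (q.1 + 1) q.2 ≠ 'X')
      (fun q => (q.1 + 1, q.2 + 0)) (fun q rc => (q.1, rc.2)) := by
  funext s k
  obtain ⟨⟨nr, nc⟩, r, c⟩ := s
  simp only [pvStepA, pvGStep]
  by_cases h1 : nr < (P.length : Int) - 1 ∧ pvCell P (nr + 1) nc ≠ 'X'
  · by_cases hk : k = dist - 1 <;> simp [h1, hk]
  · simp [h1]

theorem pvStepA_N (P : List (List Char)) (dist : Int) :
    pvStepA P dist 'N' = pvGStep dist
      (fun q => 0 < q.1 ∧ pvCell P (q.1 - 1) q.2 ≠ 'X')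
      (fun q => (q.1 + -1, q.2 + 0)) (fun q rc => (q.1, rc.2)) := by
  funext s k
  obtain ⟨⟨nr, nc⟩, r, c⟩ := s
  simp only [pvStepA, pvGStep]
  by_cases h1 : 0 < nr ∧ pvCell P (nr - 1) nc ≠ 'X'
  · by_cases hk : k = dist - 1
    · simp [h1, hk, sub_eq_add_neg]
    · have hk2 : ¬ k = dist + -1 := fun h => hk (by omega)
      simp [h1, hk2, sub_eq_add_neg]
  · have h1' : ¬ (0 < nr ∧ ¬ pvCell P (nr + -1) nc = 'X') := by
      rw [show nr + -1 = nr - 1 by ring]; exact h1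
    simp [h1', sub_eq_add_neg]

-- int(route[2]) on a digit is a Nat
theorem pvDigit_exists (ch : Char) (h : ch.isDigit = true) :
    ∃ m : Nat, (PySem.Int.ofChars? [ch]).getD 0 = (m : Int) := by
  have hb : 48 ≤ ch.toNat ∧ ch.toNat ≤ 57 := by
    simp [Char.isDigit] at h; exact ⟨h.1, h.2⟩
  have hoc := Char.ofNat_toNat ch
  have hcases : ch.toNat = 48 ∨ ch.toNat = 49 ∨ ch.toNat = 50 ∨ ch.toNat = 51 ∨ ch.toNat = 52 ∨
      ch.toNat = 53 ∨ ch.toNat = 54 ∨ ch.toNat = 55 ∨ ch.toNat = 56 ∨ ch.toNat = 57 := by omega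
  rcases hcases with h|h|h|h|h|h|h|h|h|h <;> rw [h] at hoc <;> rw [← hoc] <;>
    first
    | exact ⟨0, by decide⟩ | exact ⟨1, by decide⟩ | exact ⟨2, by decide⟩ | exact ⟨3, by decide⟩
    | exact ⟨4, by decide⟩ | exact ⟨5, by decide⟩ | exact ⟨6, by decide⟩ | exact ⟨7, by decide⟩
    | exact ⟨8, by decide⟩ | exact ⟨9, by decide⟩

-- B's cols expression is A's len(park[0]) expression
theorem pvCols_eq (P : List (List Char)) :
    (if P = [] then (0 : Int) else ((P.headD []).length : Int))
      = (((PySem.List.pyGet? P 0).getD []).length : Int) := by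
  cases P <;> simp [PySem.List.pyGet?, PySem.List.pyIdx?]

-- route[2] through pyGet? on a route of length ≥ 3
theorem pvGet2_eq (route : List Char) (h3 : 3 ≤ route.length) :
    (PySem.List.pyGet? route 2).getD ' ' = route.getD 2 ' ' := by
  rcases route with _ | ⟨x0, _ | ⟨x1, _ | ⟨x2, rest⟩⟩⟩ <;> simp at h3
  simp [PySem.List.pyGet?, PySem.List.pyIdx?]
  rw [if_pos (by omega : (2 : Int) ≤ (rest.length : Int) + 1 + 1)]
  rfl

-- one route: A's committed position equals B's closed-form move
theorem pvRoute_eq (P : List (List Char)) (route : List Char)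
    (h3 : 3 ≤ route.length) (hdig : (route.getD 2 ' ').isDigit = true) (rc : Int × Int) :
    pvRouteA P route rc
      = pvRouteB P (P.length) (if P = [] then 0 else ((P.headD []).length : Int)) route rc := by
  obtain ⟨m, hm⟩ := pvDigit_exists (route.getD 2 ' ') hdig
  rw [← pvGet2_eq route h3] at hm
  simp only [pvRouteA, pvRouteB, pvCellB_eq]
  rw [hm, pvCols_eq]
  by_cases hE : (PySem.List.pyGet? route 0).getD ' ' = 'E'
  · rw [hE, pvStepA_E]
    cases m with
    | zero =>
      rw [show ((0 : Nat) : Int) = 0 by simp, PySem.List.pyRange_one_eq_nil (le_refl 0)]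
      split_ifs with h1 h2 h3' h4 <;>
        first
          | rfl
          | (exact absurd h2.1 (by decide))
          | (exact absurd h3'.1 (by decide))
          | (exact absurd h4.1 (by decide))
          | simp
    | succ m =>
      rw [pvFold_char _ 0 1 _ (m + 1) (by omega) rc]
      simp only [zero_mul, one_mul, add_zero]
      by_cases hB : rc.2 + ((m + 1 : Nat) : Int) < (((PySem.List.pyGet? P 0).getD []).length : Int) ∧
          ∀ i ∈ PySem.List.pyRange (rc.2 + 1) (rc.2 + ((m + 1 : Nat) : Int) + 1) 1, pvCell P rc.1 i ≠ 'X'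
      · rw [if_pos ((pvAsc_iff (fun i => pvCell P rc.1 i ≠ 'X') _ rc.2 (m + 1) (by omega)).2 hB),
            if_pos ⟨trivial, hB⟩]
      · rw [if_neg (fun h => hB ((pvAsc_iff (fun i => pvCell P rc.1 i ≠ 'X') _ rc.2 (m + 1) (by omega)).1 h)),
            if_neg (fun h => hB h.2), if_neg (fun h => absurd h.1 (by decide)),
            if_neg (fun h => absurd h.1 (by decide)), if_neg (fun h => absurd h.1 (by decide))]
  · by_cases hW : (PySem.List.pyGet? route 0).getD ' ' = 'W'
    · rw [hW, pvStepA_W]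
      cases m with
      | zero =>
        rw [show ((0 : Nat) : Int) = 0 by simp, PySem.List.pyRange_one_eq_nil (le_refl 0)]
        split_ifs with h1 h2 h3' h4 <;>
          first
            | rfl
            | (exact absurd h1.1 (by decide))
            | (exact absurd h3'.1 (by decide))
            | (exact absurd h4.1 (by decide))
            | simp
      | succ m =>
        rw [pvFold_char _ 0 (-1) _ (m + 1) (by omega) rc]
        simp only [zero_mul, neg_one_mul, add_zero, ← sub_eq_add_neg]
        by_cases hB : 0 ≤ rc.2 - ((m + 1 : Nat) : Int) ∧
            ∀ i ∈ PySem.List.pyRange (rc.2 - ((m + 1 : Nat) : Int)) rc.2 1, pvCell P rc.1 i ≠ 'X'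
        · rw [if_pos ((pvDesc_iff (fun i => pvCell P rc.1 i ≠ 'X') rc.2 (m + 1) (by omega)).2 hB),
              if_neg (fun h => absurd h.1 (by decide)), if_pos ⟨trivial, hB⟩]
        · rw [if_neg (fun h => hB ((pvDesc_iff (fun i => pvCell P rc.1 i ≠ 'X') rc.2 (m + 1) (by omega)).1 h)),
              if_neg (fun h => absurd h.1 (by decide)), if_neg (fun h => hB h.2),
              if_neg (fun h => absurd h.1 (by decide)), if_neg (fun h => absurd h.1 (by decide))]
    · by_cases hS : (PySem.List.pyGet? route 0).getD ' ' = 'S'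
      · rw [hS, pvStepA_S]
        cases m with
        | zero =>
          rw [show ((0 : Nat) : Int) = 0 by simp, PySem.List.pyRange_one_eq_nil (le_refl 0)]
          split_ifs with h1 h2 h3' h4 <;>
            first
              | rfl
              | (exact absurd h1.1 (by decide))
              | (exact absurd h2.1 (by decide))
              | (exact absurd h4.1 (by decide))
              | simp
        | succ m =>
          rw [pvFold_char _ 1 0 _ (m + 1) (by omega) rc]
          simp only [zero_mul, one_mul, add_zero]
          by_cases hB : rc.1 + ((m + 1 : Nat) : Int) < (P.length : Int) ∧
              ∀ i ∈ PySem.List.pyRange (rc.1 + 1) (rc.1 + ((m + 1 : Nat) : Int) + 1) 1, pvCell P i rc.2 ≠ 'X'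
          · rw [if_pos ((pvAsc_iff (fun i => pvCell P i rc.2 ≠ 'X') _ rc.1 (m + 1) (by omega)).2 hB),
                if_neg (fun h => absurd h.1 (by decide)), if_neg (fun h => absurd h.1 (by decide)),
                if_pos ⟨trivial, hB⟩]
          · rw [if_neg (fun h => hB ((pvAsc_iff (fun i => pvCell P i rc.2 ≠ 'X') _ rc.1 (m + 1) (by omega)).1 h)),
                if_neg (fun h => absurd h.1 (by decide)), if_neg (fun h => absurd h.1 (by decide)),
                if_neg (fun h => hB h.2), if_neg (fun h => absurd h.1 (by decide))]
      · by_cases hN : (PySem.List.pyGet? route 0).getD ' ' = 'N'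
        · rw [hN, pvStepA_N]
          cases m with
          | zero =>
            rw [show ((0 : Nat) : Int) = 0 by simp, PySem.List.pyRange_one_eq_nil (le_refl 0)]
            split_ifs with h1 h2 h3' h4 <;>
              first
                | rfl
                | (exact absurd h1.1 (by decide))
                | (exact absurd h2.1 (by decide))
                | (exact absurd h3'.1 (by decide))
                | simp
          | succ m =>
            rw [pvFold_char _ (-1) 0 _ (m + 1) (by omega) rc]
            simp only [neg_one_mul, zero_mul, add_zero, ← sub_eq_add_neg]
            by_cases hB : 0 ≤ rc.1 - ((m + 1 : Nat) : Int) ∧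
                ∀ i ∈ PySem.List.pyRange (rc.1 - ((m + 1 : Nat) : Int)) rc.1 1, pvCell P i rc.2 ≠ 'X'
            · rw [if_pos ((pvDesc_iff (fun i => pvCell P i rc.2 ≠ 'X') rc.1 (m + 1) (by omega)).2 hB),
                  if_neg (fun h => absurd h.1 (by decide)), if_neg (fun h => absurd h.1 (by decide)),
                  if_neg (fun h => absurd h.1 (by decide)), if_pos ⟨trivial, hB⟩]
            · rw [if_neg (fun h => hB ((pvDesc_iff (fun i => pvCell P i rc.2 ≠ 'X') rc.1 (m + 1) (by omega)).1 h)),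
                  if_neg (fun h => absurd h.1 (by decide)), if_neg (fun h => absurd h.1 (by decide)),
                  if_neg (fun h => absurd h.1 (by decide)), if_neg (fun h => hB h.2)]
        · have hid : pvStepA P ((m : Nat) : Int) ((PySem.List.pyGet? route 0).getD ' ') = fun (s : (Int × Int) × Int × Int) (_ : Int) => s := by
            funext s k
            simp [pvStepA, hE, hW, hS, hN]
          rw [hid, PySem.List.foldl_ignore]
          rw [if_neg (fun h => hE h.1), if_neg (fun h => hW h.1), if_neg (fun h => hS h.1),
              if_neg (fun h => hN h.1)]

-- override-fold = last element of the filtered-and-mapped list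
theorem pvFoldl_override {α β : Type} (p : α → Prop) [DecidablePred p] (f : α → β) (a : β)
    (l : List α) :
    l.foldl (fun acc x => if p x then f x else acc) a
      = ((l.filter (fun x => decide (p x))).map f).getLastD a := by
  induction l generalizing a with
  | nil => rfl
  | cons x l ih =>
    rw [List.foldl_cons, List.filter_cons]
    by_cases hx : p x <;>
      simp only [hx, decide_true, decide_false, Bool.false_eq_true, ite_true, ite_false, List.map_cons,
        List.getLastD_cons, ih]

-- A's row scan is Python's row.index('S') shifted by the accumulator
theorem pvScanRow_shift (row : List Char) : ∀ j : Nat,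
    pvScanRow row j = (PySem.List.index? row 'S').map (· + j) := by
  induction row with
  | nil => intro j; simp [pvScanRow, PySem.List.index?_eq_idxOf?]
  | cons ch rest ih =>
    intro j
    by_cases hch : ch = 'S'
    · subst hch
      rw [PySem.List.index?_cons_self]
      simp [pvScanRow]
    · rw [PySem.List.index?_cons_of_ne rest hch, pvScanRow, if_neg hch, ih (j + 1)]
      cases PySem.List.index? rest 'S' with
      | none => rfl
      | some m => simp; omega

-- the double scan with break equals the last entry of B's comprehension
theorem pvStartA_eq_found (P : List (List Char)) :
    pvStartA P = (pvFoundB P).getLastD (0, 0) := by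
  unfold pvStartA pvFoundB
  have hfun : (fun (rc : Int × Int) (ir : Int × List Char) =>
        match pvScanRow ir.2 0 with
        | some j => (ir.1, (j : Int))
        | none => rc)
      = fun (rc : Int × Int) (ir : Int × List Char) =>
        if 'S' ∈ ir.2 then (ir.1, (((PySem.List.index? ir.2 'S').getD 0 : Nat) : Int)) else rc := by
    funext rc ir
    rw [pvScanRow_shift ir.2 0]
    cases hidx : PySem.List.index? ir.2 'S' with
    | none =>
      have hmem : 'S' ∉ ir.2 := (PySem.List.index?_eq_none_iff _ _).1 hidx
      simp [hmem]
    | some j =>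
      have hmem : 'S' ∈ ir.2 := (PySem.List.index?_isSome_iff _ _).1 (by rw [hidx]; rfl)
      simp [hmem]
  rw [hfun, pvFoldl_override (fun ir : Int × List Char => 'S' ∈ ir.2)
        (fun ir => (ir.1, (((PySem.List.index? ir.2 'S').getD 0 : Nat) : Int))) ((0 : Int), (0 : Int))]

-- ===== VERDICT (by name: the statement is the Claim_ definition above) =====
theorem solution_spec : Claim_equal_solution := by
  unfold Claim_equal_solution
  intro park routes _ hpre
  unfold Spec_solution
  simp only [solution, solution_alt]
  rw [pvStartA_eq_found]
  rw [PySem.List.foldl_congr_mem routes _ _ ((pvFoundB (park.map String.toList)).getLastD (0, 0))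
        (fun rc route hmem =>
          pvRoute_eq (park.map String.toList) route.toList
            (by simpa using (hpre.1 route hmem).1) ((hpre.1 route hmem).2) rc)]
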